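-- pv_equiv track=rewrite | github.com/didudua/CoSoLapTrinh | Chuong4/BT_NHOM/Bai99.py | BatkySangThap
-- ===== SOURCE A (Python) =====
-- def BatkySangThap(n, hevao, he16):
--     mu = len(n)-1
--     kq = 0
--     if hevao == 16:
--         for i in n:
--             kq += he16.index(i)*16**mu
--             mu -= 1
--         return kq
--     else:
--         for i in n:
--             kq += int(i)*hevao**mu
--             mu -= 1
--         return kq
-- ===== SOURCE B (Python) =====
-- def BatkySangThap(n, hevao, he16):
--     kq = 0
--     w = 1
--     if hevao == 16:
--         dv = {}
--         for j, s in enumerate(he16):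
--             dv.setdefault(s, j)
--         for i in reversed(n):
--             kq += dv[i] * w
--             w *= 16
--     else:
--         for i in reversed(n):
--             kq += int(i) * w
--             w *= hevao
--     return kq
-- ===== Notes on version B (the rewrite author's own statement) =====
-- stated objective: alternative
-- what changed: Replaces A's left-to-right loop with an exponent counter mu and a base**mu big-int power plus a he16.index linear scan each step by a right-to-left loop that maintains a running weight (w *= base, no exponentiation) and looks digits up in a first-occurrence dict built once from he16.
import Mathlib
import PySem

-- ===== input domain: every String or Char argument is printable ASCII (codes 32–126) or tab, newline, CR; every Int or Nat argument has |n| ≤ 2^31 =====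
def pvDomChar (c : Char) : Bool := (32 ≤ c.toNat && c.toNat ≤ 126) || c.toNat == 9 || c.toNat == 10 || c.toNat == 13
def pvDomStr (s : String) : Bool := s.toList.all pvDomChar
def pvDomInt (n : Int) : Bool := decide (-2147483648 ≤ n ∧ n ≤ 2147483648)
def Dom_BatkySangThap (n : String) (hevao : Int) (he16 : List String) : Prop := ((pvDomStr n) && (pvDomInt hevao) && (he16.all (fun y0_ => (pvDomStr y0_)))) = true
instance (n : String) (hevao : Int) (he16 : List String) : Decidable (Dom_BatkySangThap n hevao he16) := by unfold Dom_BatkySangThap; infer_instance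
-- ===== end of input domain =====

-- B replaces A's left-to-right loop (exponent counter mu, base**mu each step, linear
-- he16.index scan) by a right-to-left loop with a running weight w and a digit dict
-- built once from he16 (first occurrence wins, like list.index); same values.

-- ===== PORT A =====
def BatkySangThap (n : String) (hevao : Int) (he16 : List String) : Int :=
  let mu : Int := PySem.Str.len n - 1
  if hevao = 16 then
    (n.toList.foldl
      (fun (p : Int × Int) i =>
        (p.1 + (((PySem.List.index? he16 (String.ofList [i])).getD 0 : Nat) : Int) * 16 ^ p.2.toNat,
         p.2 - 1))
      (0, mu)).1
  else
    (n.toList.foldl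
      (fun (p : Int × Int) i =>
        (p.1 + ((PySem.Int.ofStr? (String.ofList [i])).getD 0) * hevao ^ p.2.toNat,
         p.2 - 1))
      (0, mu)).1

-- ===== PORT B =====
-- dv built by 'for j, s in enumerate(he16): dv.setdefault(s, j)'
def pvDigitMap (he16 : List String) : PySem.Dict String Int :=
  (PySem.List.enumerate he16 0).foldl (fun d p => d.setdefault p.2 p.1) PySem.Dict.empty

def BatkySangThap_alt (n : String) (hevao : Int) (he16 : List String) : Int :=
  if hevao = 16 then
    let dv := pvDigitMap he16
    -- dv[i] raises KeyError on a missing key (excluded by Pre_); getD 0 stands for the lookup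
    (n.toList.reverse.foldl
      (fun (p : Int × Int) c => (p.1 + (dv.get? (String.ofList [c])).getD 0 * p.2, p.2 * 16))
      (0, 1)).1
  else
    (n.toList.reverse.foldl
      (fun (p : Int × Int) c => (p.1 + ((PySem.Int.ofStr? (String.ofList [c])).getD 0) * p.2, p.2 * hevao))
      (0, 1)).1

-- ===== PRECONDITION & SPEC =====
-- Pre_ excludes exactly the inputs where Python A raises ValueError: in the base-16
-- branch a character of n not present in he16; otherwise a non-digit character.
def Pre_BatkySangThap (n : String) (hevao : Int) (he16 : List String) : Prop :=
  (if hevao = 16 then n.toList.all (fun c => he16.contains (String.ofList [c]))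
   else n.toList.all (fun c => c.isDigit)) = true
instance (n : String) (hevao : Int) (he16 : List String) : Decidable (Pre_BatkySangThap n hevao he16) := by unfold Pre_BatkySangThap; infer_instance
def pvWitness_BatkySangThap : String × Int × List String :=
  ("12", 10, [])
def Spec_BatkySangThap (n : String) (hevao : Int) (he16 : List String) (out : Int) : Prop := out = BatkySangThap_alt n hevao he16
instance (n : String) (hevao : Int) (he16 : List String) (out : Int) : Decidable (Spec_BatkySangThap n hevao he16 out) := by unfold Spec_BatkySangThap; infer_instance

-- ===== CLAIM (what is proved, stated in full; the proofs are below) =====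
def Claim_equal_BatkySangThap : Prop := ∀ (n : String) (hevao : Int) (he16 : List String), Dom_BatkySangThap n hevao he16 → Pre_BatkySangThap n hevao he16 → Spec_BatkySangThap n hevao he16 (BatkySangThap n hevao he16)

-- ===== LEMMAS AND PROOFS =====

-- Left Horner fold with a shifted accumulator.
lemma horner_shift (b : Int) (d : Char → Int) :
    ∀ (t : List Char) (a : Int),
      t.foldl (fun k c => k * b + d c) a
        = a * b ^ t.length + t.foldl (fun k c => k * b + d c) 0 := by
  intro t
  induction t with
  | nil => intro a; simp
  | cons c t ih =>
      intro a
      simp only [List.foldl_cons, List.length_cons]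
      rw [ih (a * b + d c), ih (0 * b + d c)]
      ring

-- A's positional-weight fold, started at exponent l.length - 1, equals kq + left Horner.
lemma pow_fold_eq (b : Int) (d : Char → Int) :
    ∀ (l : List Char) (kq : Int),
      (l.foldl (fun (p : Int × Int) c => (p.1 + d c * b ^ p.2.toNat, p.2 - 1))
        (kq, (l.length : Int) - 1)).1
      = kq + l.foldl (fun k c => k * b + d c) 0 := by
  intro l
  induction l with
  | nil => intro kq; simp
  | cons c t ih =>
      intro kq
      simp only [List.foldl_cons, List.length_cons]
      rw [show (((t.length + 1 : Nat) : Int) - 1) = (t.length : Int) by push_cast; ring]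
      rw [show ((t.length : Int)).toNat = t.length by omega]
      rw [ih (kq + d c * b ^ t.length)]
      rw [horner_shift b d t (0 * b + d c)]
      ring

-- B's running-weight fold with a shifted accumulator.
lemma rev_shift (b : Int) (d : Char → Int) :
    ∀ (m : List Char) (kq w : Int),
      (m.foldl (fun (p : Int × Int) c => (p.1 + d c * p.2, p.2 * b)) (kq, w)).1
        = kq + w * (m.foldl (fun (p : Int × Int) c => (p.1 + d c * p.2, p.2 * b)) (0, 1)).1 := by
  intro m
  induction m with
  | nil => intro kq w; simp
  | cons c t ih =>
      intro kq w
      simp only [List.foldl_cons]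
      rw [ih (kq + d c * w) (w * b), ih (0 + d c * 1) (1 * b)]
      ring

-- B's fold over the reversed digits equals the left Horner value.
lemma rev_horner (b : Int) (d : Char → Int) (l : List Char) :
    (l.reverse.foldl (fun (p : Int × Int) c => (p.1 + d c * p.2, p.2 * b)) (0, 1)).1
      = l.foldl (fun k c => k * b + d c) 0 := by
  induction l using List.reverseRecOn with
  | nil => simp
  | append_singleton t c ih =>
      rw [List.reverse_append]
      simp only [List.reverse_cons, List.reverse_nil, List.nil_append, List.singleton_append,
        List.foldl_cons, List.foldl_append, List.foldl_nil]
      rw [rev_shift b d t.reverse (0 + d c * 1) (1 * b), ih]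
      rw [horner_shift b d t 0]
      ring

-- First-wins dict build: lookup equals first index (shifted by the start j), unless already bound.
lemma build_get? (l : List String) :
    ∀ (j : Int) (d : PySem.Dict String Int) (k : String),
      ((PySem.List.enumerate l j).foldl (fun d p => d.setdefault p.2 p.1) d).get? k
        = (d.get? k).or ((PySem.List.index? l k).map (fun i => (i : Int) + j)) := by
  induction l with
  | nil =>
      intro j d k
      simp [PySem.List.enumerate_nil, PySem.List.index?_eq_idxOf?]
  | cons x t ih =>
      intro j d k
      rw [PySem.List.enumerate_cons]
      simp only [List.foldl_cons]
      rw [ih (j + 1) (d.setdefault x j) k]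
      by_cases hk : k = x
      · subst hk
        rw [PySem.Dict.get?_setdefault_self, PySem.List.index?_cons_self]
        cases hdk : d.get? k with
        | none => simp
        | some v => simp
      · rw [PySem.Dict.get?_setdefault_of_ne d j hk,
          PySem.List.index?_cons_of_ne t (Ne.symm hk)]
        cases hi : PySem.List.index? t k with
        | none => simp
        | some i =>
            cases d.get? k with
            | some v => rfl
            | none =>
                simp
                omega

-- The dict lookup agrees with he16.index (both 0 on a missing key).
lemma digitMap_get (he16 : List String) (k : String) :
    ((pvDigitMap he16).get? k).getD 0
      = (((PySem.List.index? he16 k).getD 0 : Nat) : Int) := by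
  unfold pvDigitMap
  rw [build_get? he16 0 PySem.Dict.empty k]
  cases h : PySem.List.index? he16 k <;> simp

-- ===== VERDICT (by name: the statement is the Claim_ definition above) =====
theorem BatkySangThap_spec : Claim_equal_BatkySangThap := by
  intro n hevao he16 _ _
  unfold Spec_BatkySangThap BatkySangThap BatkySangThap_alt
  simp only [PySem.Str.len_eq]
  by_cases h : hevao = 16
  · simp only [h, if_pos, digitMap_get]
    rw [pow_fold_eq 16 (fun i => (((PySem.List.index? he16 (String.ofList [i])).getD 0 : Nat) : Int)) n.toList 0]
    rw [rev_horner 16 (fun i => (((PySem.List.index? he16 (String.ofList [i])).getD 0 : Nat) : Int)) n.toList]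
    ring
  · simp only [if_neg h]
    rw [pow_fold_eq hevao (fun i => ((PySem.Int.ofStr? (String.ofList [i])).getD 0)) n.toList 0]
    rw [rev_horner hevao (fun i => ((PySem.Int.ofStr? (String.ofList [i])).getD 0)) n.toList]
    ring
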